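-- pv_equiv track=rewrite | github.com/martinve/amr-clausifier | extract_info.py | filter_triples
-- ===== SOURCE A (Python) =====
-- def filter_triples(triples, source=None,role=None,target=None):
--     if source is role is target is None:
--         return triples
--
--     triples = [
--         t for t in triples
--         if ((source is None or source == t[0])
--             and (role is None or role == t[1])
--             and (target is None or target == t[2]))
--     ]
--     return triples
-- ===== SOURCE B (Python) =====
-- def filter_triples(triples, source=None, role=None, target=None):
--     # Staged filtering: one pass per non-None criterion.
--     result = triples
--     if source is not None:
--         result = [t for t in result if source == t[0]]
--     if role is not None:
--         result = [t for t in result if role == t[1]]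
--     if target is not None:
--         result = [t for t in result if target == t[2]]
--     return result
-- ===== Notes on version B (the rewrite author's own statement) =====
-- stated objective: simpler
-- what changed: Replaces A's all-None early return plus one pass with a three-way conjunction by up to three successive single-criterion filter passes with no special case.
import Mathlib
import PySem

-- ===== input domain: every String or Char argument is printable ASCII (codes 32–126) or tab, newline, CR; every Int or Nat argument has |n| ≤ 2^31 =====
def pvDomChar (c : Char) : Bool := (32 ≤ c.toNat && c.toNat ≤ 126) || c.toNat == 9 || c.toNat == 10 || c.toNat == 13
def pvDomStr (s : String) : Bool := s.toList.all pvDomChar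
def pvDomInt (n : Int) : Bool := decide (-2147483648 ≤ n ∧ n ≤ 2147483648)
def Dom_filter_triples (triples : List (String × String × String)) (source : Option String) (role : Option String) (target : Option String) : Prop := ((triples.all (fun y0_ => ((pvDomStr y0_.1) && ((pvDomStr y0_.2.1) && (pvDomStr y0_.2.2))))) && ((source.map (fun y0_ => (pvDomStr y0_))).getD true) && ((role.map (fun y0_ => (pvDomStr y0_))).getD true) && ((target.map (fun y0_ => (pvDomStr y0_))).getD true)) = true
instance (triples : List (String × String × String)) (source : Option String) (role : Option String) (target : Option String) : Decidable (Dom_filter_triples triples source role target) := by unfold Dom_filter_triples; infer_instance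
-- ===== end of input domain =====

-- ===== PORT A =====
def filter_triples (triples : List (String × String × String)) (source : Option String) (role : Option String) (target : Option String) : List (String × String × String) :=
  if source = none ∧ role = none ∧ target = none then
    triples
  else
    triples.filter (fun t =>
      (source = none ∨ source = some t.1)
      ∧ (role = none ∨ role = some t.2.1)
      ∧ (target = none ∨ target = some t.2.2))

-- ===== PORT B =====
-- B: staged sequential filtering, one pass per non-None criterion, no special case.
def filter_triples_alt (triples : List (String × String × String)) (source : Option String) (role : Option String) (target : Option String) : List (String × String × String) :=
  let r0 := triples
  let r1 := match source with
    | none => r0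
    | some s => r0.filter (fun t => s = t.1)
  let r2 := match role with
    | none => r1
    | some s => r1.filter (fun t => s = t.2.1)
  match target with
  | none => r2
  | some s => r2.filter (fun t => s = t.2.2)

-- ===== PRECONDITION & SPEC =====
def Spec_filter_triples (triples : List (String × String × String)) (source : Option String) (role : Option String) (target : Option String) (out : List (String × String × String)) : Prop := out = filter_triples_alt triples source role target
instance (triples : List (String × String × String)) (source : Option String) (role : Option String) (target : Option String) (out : List (String × String × String)) : Decidable (Spec_filter_triples triples source role target out) := by unfold Spec_filter_triples; infer_instance

-- ===== CLAIM (what is proved, stated in full; the proofs are below) =====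
def Claim_equal_filter_triples : Prop := ∀ (triples : List (String × String × String)) (source : Option String) (role : Option String) (target : Option String), Dom_filter_triples triples source role target → Spec_filter_triples triples source role target (filter_triples triples source role target)

-- ===== LEMMAS AND PROOFS =====

-- ===== VERDICT (by name: the statement is the Claim_ definition above) =====
theorem filter_triples_spec : Claim_equal_filter_triples := by
  intro triples source role target _
  unfold Spec_filter_triples filter_triples filter_triples_alt
  rcases source with _ | s <;> rcases role with _ | r <;> rcases target with _ | t <;>
    simp only [List.filter_filter] <;>
    first
      | rfl
      | (apply List.filter_congr; intro x _;
         simp [Bool.and_comm, Bool.and_assoc])
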